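-- pv_equiv track=rewrite | github.com/0xVolt/cemetery-of-culture | year-3/natural-language-processing/5-POS-HMM.py | assignUnknownTags
-- ===== SOURCE A (Python) =====
-- import string
--
-- def assignUnknownTags(word):
--
--     punct = set(string.punctuation)
--
--     # Suffixes
--     noun_suffix = ["action", "age", "ance", "cy", "dom", "ee", "ence", "er", "hood", "ion", "ism", "ist", "ity", "ling", "ment", "ness", "or", "ry", "scape", "ship", "ty"]
--     verb_suffix = ["ate", "ify", "ise", "ize"]
--     adj_suffix = ["able", "ese", "ful", "i", "ian", "ible", "ic", "ish", "ive", "less", "ly", "ous"]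
--     adv_suffix = ["ward", "wards", "wise"]
--
--     if any(char.isdigit() for char in word):
--         return "--unk_digit--"
--
--     elif any(char in punct for char in word):
--         return "--unk_punct--"
--
--     elif any(char.isupper() for char in word):
--         return "--unk_upper--"
--
--     elif any(word.endswith(suffix) for suffix in noun_suffix):
--         return "--unk_noun--"
--
--     elif any(word.endswith(suffix) for suffix in verb_suffix):
--         return "--unk_verb--"
--
--     elif any(word.endswith(suffix) for suffix in adj_suffix):
--         return "--unk_adj--"
--
--     elif any(word.endswith(suffix) for suffix in adv_suffix):
--         return "--unk_adv--"
--
--     return "--unk--"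
-- ===== SOURCE B (Python) =====
-- import string
--
-- _CLASS_TAGS = ["", "--unk_upper--", "--unk_punct--", "--unk_digit--"]
-- _CAT_TAGS = ["--unk_noun--", "--unk_verb--", "--unk_adj--", "--unk_adv--"]
--
-- # suffix -> category index (0 noun, 1 verb, 2 adj, 3 adv); suffixes are pairwise distinct
-- _SUFFIX_CAT = {}
-- for _cat, _sufs in enumerate([
--     ["action", "age", "ance", "cy", "dom", "ee", "ence", "er", "hood", "ion", "ism", "ist", "ity", "ling", "ment", "ness", "or", "ry", "scape", "ship", "ty"],
--     ["ate", "ify", "ise", "ize"],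
--     ["able", "ese", "ful", "i", "ian", "ible", "ic", "ish", "ive", "less", "ly", "ous"],
--     ["ward", "wards", "wise"],
-- ]):
--     for _s in _sufs:
--         _SUFFIX_CAT[_s] = _cat
--
-- def assignUnknownTags(word):
--     punct = set(string.punctuation)
--     # single pass: each character is ranked (digit=3, punct=2, upper=1, other=0);
--     # the maximum rank encodes A's digit > punct > upper priority
--     rank = 0
--     for ch in word:
--         r = 3 if ch.isdigit() else (2 if ch in punct else (1 if ch.isupper() else 0))
--         if r > rank:
--             rank = r
--     if rank:
--         return _CLASS_TAGS[rank]
--     # hash-index the word's own endings instead of scanning the suffix lists: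
--     # look up word[-k:] for each feasible suffix length k, keep the best (lowest) category
--     best = None
--     for k in range(1, min(len(word), 6) + 1):
--         cat = _SUFFIX_CAT.get(word[-k:])
--         if cat is not None and (best is None or cat < best):
--             best = cat
--     return _CAT_TAGS[best] if best is not None else "--unk--"
-- ===== Notes on version B (the rewrite author's own statement) =====
-- stated objective: alternative
-- what changed: Replaces A's three separate early-exit character scans by one pass that takes the maximum of a per-character rank (digit=3, punct=2, upper=1), and replaces A's four any(endswith) scans over the suffix lists by dictionary lookups of the word's own last-k-character endings (k = 1..min(len,6)), keeping the lowest-category hit (measured ~1.6x faster at the largest size: one traversal instead of three and O(1) suffix lookups).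
import Mathlib
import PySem

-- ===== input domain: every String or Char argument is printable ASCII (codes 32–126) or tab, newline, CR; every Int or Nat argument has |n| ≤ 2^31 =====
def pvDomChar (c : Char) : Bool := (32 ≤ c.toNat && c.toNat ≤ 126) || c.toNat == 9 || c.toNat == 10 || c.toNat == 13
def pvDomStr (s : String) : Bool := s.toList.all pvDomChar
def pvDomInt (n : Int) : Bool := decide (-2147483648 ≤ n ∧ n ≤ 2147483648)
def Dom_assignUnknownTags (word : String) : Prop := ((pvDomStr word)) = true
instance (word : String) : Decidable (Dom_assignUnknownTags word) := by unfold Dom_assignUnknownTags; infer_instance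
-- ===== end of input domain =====

-- B replaces A's three early-exit character scans by a single max-of-ranks pass and replaces
-- A's scans over the suffix lists by dictionary lookups of the word's own endings (alternative decomposition).

set_option maxRecDepth 16384

-- ===== PORT A =====
def pvPunct : PySem.Set Char := PySem.Set.ofList "!\"#$%&'()*+,-./:;<=>?@[\\]^_`{|}~".toList

def pvNounSuffix : List String := ["action", "age", "ance", "cy", "dom", "ee", "ence", "er", "hood", "ion", "ism", "ist", "ity", "ling", "ment", "ness", "or", "ry", "scape", "ship", "ty"]
def pvVerbSuffix : List String := ["ate", "ify", "ise", "ize"]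
def pvAdjSuffix : List String := ["able", "ese", "ful", "i", "ian", "ible", "ic", "ish", "ive", "less", "ly", "ous"]
def pvAdvSuffix : List String := ["ward", "wards", "wise"]

def assignUnknownTags (word : String) : String :=
  if word.toList.any (fun c => PySem.Chars.isdigit c) then "--unk_digit--"
  else if word.toList.any (fun c => pvPunct.contains c) then "--unk_punct--"
  else if word.toList.any (fun c => PySem.Chars.isupper c) then "--unk_upper--"
  else if pvNounSuffix.any (fun suf => PySem.Str.endswith word suf) then "--unk_noun--"
  else if pvVerbSuffix.any (fun suf => PySem.Str.endswith word suf) then "--unk_verb--"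
  else if pvAdjSuffix.any (fun suf => PySem.Str.endswith word suf) then "--unk_adj--"
  else if pvAdvSuffix.any (fun suf => PySem.Str.endswith word suf) then "--unk_adv--"
  else "--unk--"

-- ===== PORT B =====
def pvClassTags : List String := ["", "--unk_upper--", "--unk_punct--", "--unk_digit--"]
def pvCatTags : List String := ["--unk_noun--", "--unk_verb--", "--unk_adj--", "--unk_adv--"]

/-- suffix -> category index (0 noun, 1 verb, 2 adj, 3 adv), as Source B builds `_SUFFIX_CAT`. -/
def pvSuffixCat : PySem.Dict String Nat := PySem.Dict.ofList
  [("action", 0), ("age", 0), ("ance", 0), ("cy", 0), ("dom", 0), ("ee", 0), ("ence", 0),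
   ("er", 0), ("hood", 0), ("ion", 0), ("ism", 0), ("ist", 0), ("ity", 0), ("ling", 0),
   ("ment", 0), ("ness", 0), ("or", 0), ("ry", 0), ("scape", 0), ("ship", 0), ("ty", 0),
   ("ate", 1), ("ify", 1), ("ise", 1), ("ize", 1),
   ("able", 2), ("ese", 2), ("ful", 2), ("i", 2), ("ian", 2), ("ible", 2), ("ic", 2),
   ("ish", 2), ("ive", 2), ("less", 2), ("ly", 2), ("ous", 2),
   ("ward", 3), ("wards", 3), ("wise", 3)]

/-- rank of one character: digit=3, punct=2, upper=1, other=0 (Source B's `r`). -/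
def pvRank (c : Char) : Nat :=
  if PySem.Chars.isdigit c then 3
  else if pvPunct.contains c then 2
  else if PySem.Chars.isupper c then 1
  else 0

def assignUnknownTags_alt (word : String) : String :=
  let rank := word.toList.foldl (fun r c => if pvRank c > r then pvRank c else r) 0
  if rank ≠ 0 then pvClassTags.getD rank ""
  else
    let best := (PySem.List.pyRange 1 (min (PySem.Str.len word) 6 + 1) 1).foldl
      (fun (best : Option Nat) k =>
        match pvSuffixCat.get? (PySem.Str.slice word (some (-k)) none) with
        | some cat => if best.isNone || cat < best.getD 0 then some cat else best
        | none => best)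
      none
    match best with
    | some b => pvCatTags.getD b "--unk--"
    | none => "--unk--"

-- ===== PRECONDITION & SPEC =====
def Spec_assignUnknownTags (word : String) (out : String) : Prop := out = assignUnknownTags_alt word
instance (word : String) (out : String) : Decidable (Spec_assignUnknownTags word out) := by unfold Spec_assignUnknownTags; infer_instance

-- ===== CLAIM (what is proved, stated in full; the proofs are below) =====
def Claim_equal_assignUnknownTags : Prop := ∀ (word : String), Dom_assignUnknownTags word → Spec_assignUnknownTags word (assignUnknownTags word)

-- ===== LEMMAS AND PROOFS =====

-- proof-only abbreviations for B's suffix loop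
def pvHit (word : String) (k : Int) : Option Nat :=
  pvSuffixCat.get? (PySem.Str.slice word (some (-k)) none)

def pvStep (word : String) (best : Option Nat) (k : Int) : Option Nat :=
  match pvHit word k with
  | some cat => if best.isNone || cat < best.getD 0 then some cat else best
  | none => best

def pvKs (word : String) : List Int := PySem.List.pyRange 1 (min (PySem.Str.len word) 6 + 1) 1

theorem pvRankFold (l : List Char) (a : Nat) :
    l.foldl (fun r c => if pvRank c > r then pvRank c else r) a
      = max a (l.foldr (fun c m => max (pvRank c) m) 0) := by
  induction l generalizing a with
  | nil => simp
  | cons c t ih =>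
    simp only [List.foldl_cons, List.foldr_cons, ih]
    split_ifs <;> omega

theorem pvMaxRank (l : List Char) :
    l.foldr (fun c m => max (pvRank c) m) 0
      = if l.any (fun c => PySem.Chars.isdigit c) then 3
        else if l.any (fun c => pvPunct.contains c) then 2
        else if l.any (fun c => PySem.Chars.isupper c) then 1
        else 0 := by
  induction l with
  | nil => simp
  | cons c t ih =>
    simp only [List.foldr_cons, List.any_cons]
    rw [ih, pvRank]
    simp only [Bool.or_eq_true]
    by_cases hd : PySem.Chars.isdigit c = true <;>
      by_cases hp : pvPunct.contains c = true <;>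
        by_cases hu : PySem.Chars.isupper c = true <;>
          by_cases hD : (t.any fun c => PySem.Chars.isdigit c) = true <;>
            by_cases hP : (t.any fun c => pvPunct.contains c) = true <;>
              by_cases hU : (t.any fun c => PySem.Chars.isupper c) = true <;>
                simp only [hd, hp, hu, hD, hP, hU] <;> simp

theorem pvStep_none (word : String) (b : Option Nat) (k : Int)
    (hh : pvHit word k = none) : pvStep word b k = b := by
  simp [pvStep, hh]

theorem pvStep_some (word : String) (b : Option Nat) (k : Int) (cat : Nat)
    (hh : pvHit word k = some cat) :
    pvStep word b k = if b.isNone || cat < b.getD 0 then some cat else b := by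
  simp [pvStep, hh]

theorem pvFold_min_le (word : String) (ks : List Int) (b : Option Nat) (c : Nat)
    (h : ks.foldl (pvStep word) b = some c) :
    (∀ m, b = some m → c ≤ m) ∧ ∀ k ∈ ks, ∀ c', pvHit word k = some c' → c ≤ c' := by
  induction ks generalizing b with
  | nil =>
    simp only [List.foldl_nil] at h
    subst h
    exact ⟨fun m hm => by cases hm; rfl, fun k hk => absurd hk (List.not_mem_nil)⟩
  | cons k ks ih =>
    simp only [List.foldl_cons] at h
    obtain ⟨h1, h2⟩ := ih _ h
    have hstep : ∀ m, pvStep word b k = some m → c ≤ m := h1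
    constructor
    · intro m hm
      subst hm
      cases hh : pvHit word k with
      | none => exact hstep m (pvStep_none word _ k hh)
      | some cat =>
        rw [pvStep_some word _ k cat hh] at hstep
        by_cases hlt : cat < m
        · have := hstep cat (by simp [hlt])
          omega
        · exact hstep m (by simp [hlt])
    · intro k' hk' c' hc'
      rcases List.mem_cons.mp hk' with rfl | hk'
      · rw [pvStep_some word b k' c' hc'] at hstep
        cases b with
        | none => exact hstep c' (by simp)
        | some m =>
          by_cases hlt : c' < m
          · exact hstep c' (by simp [hlt])
          · have := hstep m (by simp [hlt])
            omega
      · exact h2 k' hk' c' hc'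

theorem pvFold_mem (word : String) (ks : List Int) (b : Option Nat) (c : Nat)
    (h : ks.foldl (pvStep word) b = some c) :
    b = some c ∨ ∃ k ∈ ks, pvHit word k = some c := by
  induction ks generalizing b with
  | nil => exact Or.inl h
  | cons k ks ih =>
    simp only [List.foldl_cons] at h
    rcases ih _ h with hb | ⟨k', hk', hc'⟩
    · cases hh : pvHit word k with
      | none =>
        rw [pvStep_none word b k hh] at hb
        exact Or.inl hb
      | some cat =>
        rw [pvStep_some word b k cat hh] at hb
        split at hb
        · exact Or.inr ⟨k, List.mem_cons_self, by rw [hh, ← hb]⟩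
        · exact Or.inl hb
    · exact Or.inr ⟨k', List.mem_cons_of_mem _ hk', hc'⟩

theorem pvFold_isSome (word : String) (ks : List Int) (b : Option Nat)
    (h : b.isSome = true ∨ ∃ k ∈ ks, (pvHit word k).isSome = true) :
    (ks.foldl (pvStep word) b).isSome = true := by
  induction ks generalizing b with
  | nil =>
    rcases h with h | ⟨k, hk, _⟩
    · exact h
    · exact absurd hk (by simp)
  | cons k ks ih =>
    simp only [List.foldl_cons]
    apply ih
    rcases h with h | ⟨k', hk', hs⟩
    · left
      cases hh : pvHit word k with
      | none => rw [pvStep_none word b k hh]; exact h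
      | some cat => rw [pvStep_some word b k cat hh]; split <;> simp [h]
    · rcases List.mem_cons.mp hk' with rfl | hk'
      · left
        cases hh : pvHit word k' with
        | none => simp [hh] at hs
        | some cat =>
          rw [pvStep_some word b k' cat hh]
          split
          · simp
          · cases b with
            | none => simp_all
            | some m => simp
      · exact Or.inr ⟨k', hk', hs⟩

-- every suffix of category list `sufs` is in the dict with value `cat` and has length 1..6
theorem pvNounFacts : ∀ s ∈ pvNounSuffix, pvSuffixCat.get? s = some 0 ∧ 1 ≤ s.toList.length ∧ s.toList.length ≤ 6 := by decide
theorem pvVerbFacts : ∀ s ∈ pvVerbSuffix, pvSuffixCat.get? s = some 1 ∧ 1 ≤ s.toList.length ∧ s.toList.length ≤ 6 := by decide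
theorem pvAdjFacts : ∀ s ∈ pvAdjSuffix, pvSuffixCat.get? s = some 2 ∧ 1 ≤ s.toList.length ∧ s.toList.length ≤ 6 := by decide
theorem pvAdvFacts : ∀ s ∈ pvAdvSuffix, pvSuffixCat.get? s = some 3 ∧ 1 ≤ s.toList.length ∧ s.toList.length ≤ 6 := by decide

-- every (key, value) of the dict sends the key into the value's category list
theorem pvPairsSound : ∀ p ∈ pvSuffixCat.items,
    (p.2 = 0 → p.1 ∈ pvNounSuffix) ∧ (p.2 = 1 → p.1 ∈ pvVerbSuffix) ∧
    (p.2 = 2 → p.1 ∈ pvAdjSuffix) ∧ (p.2 = 3 → p.1 ∈ pvAdvSuffix) ∧ p.2 ≤ 3 := by decide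

theorem pvBwd (word : String) (cat : Nat) (sufs : List String)
    (hsufs : ∀ s ∈ sufs, pvSuffixCat.get? s = some cat ∧ 1 ≤ s.toList.length ∧ s.toList.length ≤ 6)
    (h : sufs.any (fun suf => PySem.Str.endswith word suf) = true) :
    ∃ k ∈ pvKs word, pvHit word k = some cat := by
  obtain ⟨s, hs, hend⟩ := List.any_eq_true.mp h
  obtain ⟨hget, hlen1, hlen6⟩ := hsufs s hs
  rw [PySem.Str.endswith_eq, PySem.Chars.endswith_iff] at hend
  have hle : s.toList.length ≤ word.toList.length := hend.length_le
  refine ⟨(s.toList.length : Int), ?_, ?_⟩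
  · rw [pvKs, PySem.List.mem_pyRange_one, PySem.Str.len_eq]
    constructor
    · exact_mod_cast hlen1
    · have h6 : (s.toList.length : Int) ≤ 6 := by exact_mod_cast hlen6
      have hn : (s.toList.length : Int) ≤ (word.toList.length : Int) := by exact_mod_cast hle
      omega
  · unfold pvHit
    have hslice : PySem.Str.slice word (some (-(s.toList.length : Int))) none = s := by
      apply String.toList_inj.mp
      rw [PySem.Str.toList_slice, PySem.Chars.slice_eq_listSlice,
        PySem.List.slice_from_neg_natCast _ _ (by omega)]
      exact (List.suffix_iff_eq_drop.mp hend).symm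
    rw [hslice, hget]

theorem pvFwd (word : String) (k : Int) (c : Nat) (hk : 1 ≤ k)
    (h : pvHit word k = some c) :
    (c = 0 ∧ pvNounSuffix.any (fun suf => PySem.Str.endswith word suf) = true) ∨
    (c = 1 ∧ pvVerbSuffix.any (fun suf => PySem.Str.endswith word suf) = true) ∨
    (c = 2 ∧ pvAdjSuffix.any (fun suf => PySem.Str.endswith word suf) = true) ∨
    (c = 3 ∧ pvAdvSuffix.any (fun suf => PySem.Str.endswith word suf) = true) := by
  unfold pvHit at h
  have hmem := PySem.Dict.mem_items_of_get?_eq_some _ h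
  have hsuf : (PySem.Str.slice word (some (-k)) none).toList <:+ word.toList := by
    rw [PySem.Str.toList_slice, PySem.Chars.slice_eq_listSlice]
    have hkk : (-k) = -((k.toNat : Nat) : Int) := by omega
    rw [hkk, PySem.List.slice_from_neg_natCast _ _ (by omega)]
    exact List.drop_suffix _ _
  have hend : PySem.Str.endswith word (PySem.Str.slice word (some (-k)) none) = true := by
    rw [PySem.Str.endswith_eq, PySem.Chars.endswith_iff]
    exact hsuf
  obtain ⟨h0, h1, h2, h3, hle⟩ := pvPairsSound _ hmem
  simp only at h0 h1 h2 h3 hle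
  match c, hle with
  | 0, _ => exact Or.inl ⟨rfl, List.any_eq_true.mpr ⟨_, h0 rfl, hend⟩⟩
  | 1, _ => exact Or.inr (Or.inl ⟨rfl, List.any_eq_true.mpr ⟨_, h1 rfl, hend⟩⟩)
  | 2, _ => exact Or.inr (Or.inr (Or.inl ⟨rfl, List.any_eq_true.mpr ⟨_, h2 rfl, hend⟩⟩))
  | 3, _ => exact Or.inr (Or.inr (Or.inr ⟨rfl, List.any_eq_true.mpr ⟨_, h3 rfl, hend⟩⟩))

theorem pvMem_ks_one_le (word : String) (k : Int) (hk : k ∈ pvKs word) : 1 ≤ k :=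
  (PySem.List.mem_pyRange_one.mp hk).1

-- ===== VERDICT (by name: the statement is the Claim_ definition above) =====
theorem assignUnknownTags_spec : Claim_equal_assignUnknownTags := by
  intro word _
  unfold Spec_assignUnknownTags assignUnknownTags assignUnknownTags_alt
  have hfold : (word.toList.foldl (fun r c => if pvRank c > r then pvRank c else r) 0)
      = if (word.toList.any fun c => PySem.Chars.isdigit c) = true then 3
        else if (word.toList.any fun c => pvPunct.contains c) = true then 2
        else if (word.toList.any fun c => PySem.Chars.isupper c) = true then 1
        else 0 := by
    rw [pvRankFold, pvMaxRank]; omega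
  rw [hfold]
  have hbestF : ((PySem.List.pyRange 1 (min (PySem.Str.len word) 6 + 1) 1).foldl
      (fun (best : Option Nat) k =>
        match pvSuffixCat.get? (PySem.Str.slice word (some (-k)) none) with
        | some cat => if best.isNone || cat < best.getD 0 then some cat else best
        | none => best)
      none) = (pvKs word).foldl (pvStep word) none := rfl
  rw [hbestF]
  by_cases hD : (word.toList.any fun c => PySem.Chars.isdigit c) = true
  · rw [if_pos hD, if_pos hD]; rfl
  · by_cases hP : (word.toList.any fun c => pvPunct.contains c) = true
    · rw [if_neg hD, if_neg hD, if_pos hP, if_pos hP]; rfl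
    · by_cases hU : (word.toList.any fun c => PySem.Chars.isupper c) = true
      · rw [if_neg hD, if_neg hD, if_neg hP, if_neg hP, if_pos hU, if_pos hU]; rfl
      · rw [if_neg hD, if_neg hD, if_neg hP, if_neg hP, if_neg hU, if_neg hU,
          if_neg (show ¬((0 : Nat) ≠ 0) by omega)]
        by_cases hN : (pvNounSuffix.any fun suf => PySem.Str.endswith word suf) = true
        · obtain ⟨k0, hk0, hhit⟩ := pvBwd word 0 pvNounSuffix pvNounFacts hN
          have hS := pvFold_isSome word (pvKs word) none (Or.inr ⟨k0, hk0, by rw [hhit]; rfl⟩)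
          obtain ⟨c, hc⟩ := Option.isSome_iff_exists.mp hS
          have hle := (pvFold_min_le word _ _ _ hc).2 k0 hk0 0 hhit
          have hc0 : c = 0 := by omega
          rw [hc, hc0, if_pos hN]
          rfl
        · by_cases hV : (pvVerbSuffix.any fun suf => PySem.Str.endswith word suf) = true
          · obtain ⟨k0, hk0, hhit⟩ := pvBwd word 1 pvVerbSuffix pvVerbFacts hV
            have hS := pvFold_isSome word (pvKs word) none (Or.inr ⟨k0, hk0, by rw [hhit]; rfl⟩)
            obtain ⟨c, hc⟩ := Option.isSome_iff_exists.mp hS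
            have hle := (pvFold_min_le word _ _ _ hc).2 k0 hk0 1 hhit
            obtain ⟨k1, hk1, hhit1⟩ := (pvFold_mem word _ _ _ hc).resolve_left (by simp)
            have hcs := pvFwd word k1 c (pvMem_ks_one_le word k1 hk1) hhit1
            have hc1 : c = 1 := by
              rcases hcs with ⟨_, hn⟩ | ⟨hcv, _⟩ | ⟨hcj, _⟩ | ⟨hca, _⟩
              · exact absurd hn hN
              · exact hcv
              · omega
              · omega
            rw [hc, hc1, if_neg hN, if_pos hV]
            rfl
          · by_cases hJ : (pvAdjSuffix.any fun suf => PySem.Str.endswith word suf) = true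
            · obtain ⟨k0, hk0, hhit⟩ := pvBwd word 2 pvAdjSuffix pvAdjFacts hJ
              have hS := pvFold_isSome word (pvKs word) none (Or.inr ⟨k0, hk0, by rw [hhit]; rfl⟩)
              obtain ⟨c, hc⟩ := Option.isSome_iff_exists.mp hS
              have hle := (pvFold_min_le word _ _ _ hc).2 k0 hk0 2 hhit
              obtain ⟨k1, hk1, hhit1⟩ := (pvFold_mem word _ _ _ hc).resolve_left (by simp)
              have hcs := pvFwd word k1 c (pvMem_ks_one_le word k1 hk1) hhit1
              have hc2 : c = 2 := by
                rcases hcs with ⟨_, hn⟩ | ⟨_, hv⟩ | ⟨hcj, _⟩ | ⟨hca, _⟩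
                · exact absurd hn hN
                · exact absurd hv hV
                · exact hcj
                · omega
              rw [hc, hc2, if_neg hN, if_neg hV, if_pos hJ]
              rfl
            · by_cases hW : (pvAdvSuffix.any fun suf => PySem.Str.endswith word suf) = true
              · obtain ⟨k0, hk0, hhit⟩ := pvBwd word 3 pvAdvSuffix pvAdvFacts hW
                have hS := pvFold_isSome word (pvKs word) none (Or.inr ⟨k0, hk0, by rw [hhit]; rfl⟩)
                obtain ⟨c, hc⟩ := Option.isSome_iff_exists.mp hS
                obtain ⟨k1, hk1, hhit1⟩ := (pvFold_mem word _ _ _ hc).resolve_left (by simp)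
                have hcs := pvFwd word k1 c (pvMem_ks_one_le word k1 hk1) hhit1
                have hc3 : c = 3 := by
                  rcases hcs with ⟨_, hn⟩ | ⟨_, hv⟩ | ⟨_, hj⟩ | ⟨hca, _⟩
                  · exact absurd hn hN
                  · exact absurd hv hV
                  · exact absurd hj hJ
                  · exact hca
                rw [hc, hc3, if_neg hN, if_neg hV, if_neg hJ, if_pos hW]
                rfl
              · cases hc : (pvKs word).foldl (pvStep word) none with
                | none => rw [if_neg hN, if_neg hV, if_neg hJ, if_neg hW]
                | some c =>
                  obtain ⟨k1, hk1, hhit1⟩ := (pvFold_mem word _ _ _ hc).resolve_left (by simp)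
                  have hcs := pvFwd word k1 c (pvMem_ks_one_le word k1 hk1) hhit1
                  rcases hcs with ⟨_, hn⟩ | ⟨_, hv⟩ | ⟨_, hj⟩ | ⟨_, hw⟩
                  · exact absurd hn hN
                  · exact absurd hv hV
                  · exact absurd hj hJ
                  · exact absurd hw hW
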